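-- pv_equiv track=rewrite | github.com/dIronmanb/Algorithm_Exercise | BOJ/1308.py | get_n_year_day
-- ===== SOURCE A (Python) =====
-- def get_n_year_day(start_year, n):
--     year_day_n = 0
--
--     for year in range(start_year, start_year+n):
--         if year % 400 == 0:
--             year_day_n += 366
--         elif year % 100 == 0:
--             year_day_n += 365
--         elif year % 4 == 0:
--             year_day_n += 366
--         else:
--             year_day_n += 365
--     return year_day_n
-- ===== SOURCE B (Python) =====
-- def get_n_year_day(start_year, n):
--     if n <= 0:
--         return 0
--
--     def leaps_below(y):
--         # number of leap years strictly before year y (works for any integer year)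
--         return (y - 1) // 4 - (y - 1) // 100 + (y - 1) // 400
--
--     return 365 * n + leaps_below(start_year + n) - leaps_below(start_year)
-- ===== Notes on version B (the rewrite author's own statement) =====
-- stated objective: faster
-- what changed: Replaced the per-year loop with a closed form: 365*n plus a leap-year count over the interval computed by floor divisions (/4 - /100 + /400).
import Mathlib
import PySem

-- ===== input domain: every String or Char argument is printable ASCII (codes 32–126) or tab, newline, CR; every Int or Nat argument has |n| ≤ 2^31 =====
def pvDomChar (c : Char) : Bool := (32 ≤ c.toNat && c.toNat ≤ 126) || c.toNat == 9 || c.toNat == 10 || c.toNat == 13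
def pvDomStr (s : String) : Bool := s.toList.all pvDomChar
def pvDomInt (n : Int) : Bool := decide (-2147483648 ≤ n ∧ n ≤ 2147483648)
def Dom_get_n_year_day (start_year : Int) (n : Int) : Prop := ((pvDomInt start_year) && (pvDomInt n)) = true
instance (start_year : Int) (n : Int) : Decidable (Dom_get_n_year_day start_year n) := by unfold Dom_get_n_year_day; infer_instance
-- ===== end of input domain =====

-- B replaces A's per-year loop by a closed form (365*n plus a leap-year count via floor divisions); objective: faster.


-- ===== PORT A =====
def get_n_year_day (start_year : Int) (n : Int) : Int :=
  (PySem.List.pyRange start_year (start_year + n) 1).foldl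
    (fun year_day_n year =>
      if PySem.Int.mod year 400 = 0 then year_day_n + 366
      else if PySem.Int.mod year 100 = 0 then year_day_n + 365
      else if PySem.Int.mod year 4 = 0 then year_day_n + 366
      else year_day_n + 365) 0

-- ===== PORT B =====
def leapsBelow (y : Int) : Int :=
  PySem.Int.floordiv (y - 1) 4 - PySem.Int.floordiv (y - 1) 100 + PySem.Int.floordiv (y - 1) 400

def get_n_year_day_alt (start_year : Int) (n : Int) : Int :=
  if n ≤ 0 then 0
  else 365 * n + leapsBelow (start_year + n) - leapsBelow start_year

-- ===== PRECONDITION & SPEC =====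
def Spec_get_n_year_day (start_year : Int) (n : Int) (out : Int) : Prop := out = get_n_year_day_alt start_year n
instance (start_year : Int) (n : Int) (out : Int) : Decidable (Spec_get_n_year_day start_year n out) := by unfold Spec_get_n_year_day; infer_instance

-- ===== CLAIM (what is proved, stated in full; the proofs are below) =====
def Claim_equal_get_n_year_day : Prop := ∀ (start_year : Int) (n : Int), Dom_get_n_year_day start_year n → Spec_get_n_year_day start_year n (get_n_year_day start_year n)

-- ===== LEMMAS AND PROOFS =====

-- per-year days equal 365 plus the change of the leap counter
theorem day_eq_leapsBelow_step (y : Int) :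
    (if PySem.Int.mod y 400 = 0 then (365:Int) + 1
     else if PySem.Int.mod y 100 = 0 then 365
     else if PySem.Int.mod y 4 = 0 then 365 + 1
     else 365) = 365 + (leapsBelow (y + 1) - leapsBelow y) := by
  unfold leapsBelow
  rw [PySem.Int.mod_eq_emod_of_pos (a := y) (show (0:Int) < 400 by norm_num),
      PySem.Int.mod_eq_emod_of_pos (a := y) (show (0:Int) < 100 by norm_num),
      PySem.Int.mod_eq_emod_of_pos (a := y) (show (0:Int) < 4 by norm_num),
      PySem.Int.floordiv_eq_ediv_of_pos (a := y + 1 - 1) (show (0:Int) < 4 by norm_num),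
      PySem.Int.floordiv_eq_ediv_of_pos (a := y + 1 - 1) (show (0:Int) < 100 by norm_num),
      PySem.Int.floordiv_eq_ediv_of_pos (a := y + 1 - 1) (show (0:Int) < 400 by norm_num),
      PySem.Int.floordiv_eq_ediv_of_pos (a := y - 1) (show (0:Int) < 4 by norm_num),
      PySem.Int.floordiv_eq_ediv_of_pos (a := y - 1) (show (0:Int) < 100 by norm_num),
      PySem.Int.floordiv_eq_ediv_of_pos (a := y - 1) (show (0:Int) < 400 by norm_num)]
  split_ifs <;> omega

theorem get_n_year_day_nat (s : Int) (m : Nat) :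
    get_n_year_day s m = 365 * m + leapsBelow (s + m) - leapsBelow s := by
  induction m with
  | zero =>
    simp [get_n_year_day]
  | succ k ih =>
    unfold get_n_year_day at ih ⊢
    rw [show s + ((k:Nat)+1 : Nat) = (s + (k:Nat)) + 1 by push_cast; ring,
        PySem.List.pyRange_one_succ_right (a := s) (b := s + (k:Nat)) (by omega),
        List.foldl_append, ih]
    simp only [List.foldl_cons, List.foldl_nil]
    have h := day_eq_leapsBelow_step (s + (k:Nat))
    split_ifs at h ⊢ <;> push_cast <;> omega

-- ===== VERDICT (by name: the statement is the Claim_ definition above) =====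
theorem get_n_year_day_spec : Claim_equal_get_n_year_day := by
  intro s n _
  unfold Spec_get_n_year_day get_n_year_day_alt
  by_cases hn : n ≤ 0
  · simp [hn, get_n_year_day, PySem.List.pyRange_one_eq_nil (a := s) (b := s + n) (by omega)]
  · have hpos : 0 < n := by omega
    have : n = ((n.toNat : Nat) : Int) := by omega
    rw [if_neg hn, this, get_n_year_day_nat]
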